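-- pv_equiv track=rewrite | github.com/Twip-Emma/QQbot-Twip-v2 | Twip/user/user_info/__init__.py | find_coin_max
-- ===== SOURCE A (Python) =====
-- def find_coin_max(now_max: int) -> dict:
--     COIN_TABLE = {
--             100:50,
--             105:100,
--             110:200,
--             115:300,
--             120:500,
--             125:1000,
--             130:2000,
--             135:5000,
--             140:7500,
--             145:10000,
--             150:22500,
--             155:40000,
--             160:70000,
--             165:100000,
--             170:120000,
--             175:140000,
--             180:160000,
--             185:180000,
--             190:200000,
--             195:220000,
--             200:240000,
--             205:260000,
--             210:280000,
--             215:300000,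
--             220:320000,
--             225:340000,
--             230:360000,
--             235:380000,
--             240:400000,
--             245:420000,
--             250:440000,
--         }
--     now_level = 1
--     level_up = 50
--     for item in COIN_TABLE.items():
--         if item[0] == now_max:
--             level_up = item[1]
--             break
--         now_level += 1
--
--     p = now_level
--     next_coin_max = None
--     for item in COIN_TABLE.items():
--         if p == 0:
--             next_coin_max = item[0]
--             break
--         p -= 1
--
--     return {
--         "now_level":now_level,
--         "max_level":len(COIN_TABLE),
--         "level_up":level_up,
--         "next_coin_max":next_coin_max
--     }
-- ===== SOURCE B (Python) =====
-- def find_coin_max(now_max: int) -> dict: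
--     COIN_TABLE = {
--         100: 50, 105: 100, 110: 200, 115: 300, 120: 500, 125: 1000,
--         130: 2000, 135: 5000, 140: 7500, 145: 10000, 150: 22500,
--         155: 40000, 160: 70000, 165: 100000, 170: 120000, 175: 140000,
--         180: 160000, 185: 180000, 190: 200000, 195: 220000, 200: 240000,
--         205: 260000, 210: 280000, 215: 300000, 220: 320000, 225: 340000,
--         230: 360000, 235: 380000, 240: 400000, 245: 420000, 250: 440000,
--     }
--     keys = list(COIN_TABLE)
--     if now_max in COIN_TABLE:
--         idx = (int(now_max) - 100) // 5
--         now_level = idx + 1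
--         level_up = COIN_TABLE[now_max]
--         next_coin_max = keys[idx + 1] if idx + 1 < len(keys) else None
--     else:
--         now_level = len(keys) + 1
--         level_up = 50
--         next_coin_max = None
--     return {
--         "now_level": now_level,
--         "max_level": len(COIN_TABLE),
--         "level_up": level_up,
--         "next_coin_max": next_coin_max,
--     }
-- ===== Notes on version B (the rewrite author's own statement) =====
-- stated objective: simpler
-- what changed: Replaced A's two linear scans over the coin table (one counting the level with break, one counting down to find the next key) with a single membership test plus a closed-form arithmetic index into the evenly-spaced key sequence.
import Mathlib
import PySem

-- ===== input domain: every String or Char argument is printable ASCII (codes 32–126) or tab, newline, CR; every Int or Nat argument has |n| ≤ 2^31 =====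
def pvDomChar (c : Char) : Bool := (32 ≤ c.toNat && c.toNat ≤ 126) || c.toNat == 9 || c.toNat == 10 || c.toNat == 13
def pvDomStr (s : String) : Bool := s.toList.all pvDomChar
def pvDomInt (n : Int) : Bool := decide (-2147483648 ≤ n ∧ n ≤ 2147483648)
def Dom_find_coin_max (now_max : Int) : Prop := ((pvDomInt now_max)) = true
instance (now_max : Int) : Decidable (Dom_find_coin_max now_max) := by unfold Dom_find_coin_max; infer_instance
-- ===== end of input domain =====

-- B replaces A's two linear scans of the coin table with one membership test plus a
-- closed-form index (the keys are the arithmetic sequence 100,105,…,250); objective: simpler.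

-- ===== PORT A =====
-- A's first loop: walk the items, counting now_level, break at a matching key.
def fcmLoop1 (now_max : Int) : List (Int × Int) → Int → Int × Int
  | [], lvl => (lvl, 50)
  | (k, v) :: rest, lvl =>
    if now_max = k then (lvl, v) else fcmLoop1 now_max rest (lvl + 1)

-- A's second loop: walk the items with countdown p, return the key where p hits 0.
def fcmLoop2 : List (Int × Int) → Int → Option Int
  | [], _ => none
  | (k, _) :: rest, p => if p = 0 then some k else fcmLoop2 rest (p - 1)

def fcmTable : List (Int × Int) := [(100, 50), (105, 100), (110, 200), (115, 300), (120, 500), (125, 1000), (130, 2000), (135, 5000), (140, 7500), (145, 10000), (150, 22500), (155, 40000), (160, 70000), (165, 100000), (170, 120000), (175, 140000), (180, 160000), (185, 180000), (190, 200000), (195, 220000), (200, 240000), (205, 260000), (210, 280000), (215, 300000), (220, 320000), (225, 340000), (230, 360000), (235, 380000), (240, 400000), (245, 420000), (250, 440000)]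

def find_coin_max (now_max : Int) : List (String × Option Int) :=
  let res := fcmLoop1 now_max fcmTable 1
  let now_level := res.1
  let level_up := res.2
  let next_coin_max := fcmLoop2 fcmTable now_level
  [("now_level", some now_level), ("max_level", some (fcmTable.length : Int)),
   ("level_up", some level_up), ("next_coin_max", next_coin_max)]

-- ===== PORT B =====
def fcmKeys : List Int := [100, 105, 110, 115, 120, 125, 130, 135, 140, 145, 150, 155, 160, 165, 170, 175, 180, 185, 190, 195, 200, 205, 210, 215, 220, 225, 230, 235, 240, 245, 250]

def find_coin_max_alt (now_max : Int) : List (String × Option Int) :=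
  if now_max ∈ fcmKeys then
    let idx := PySem.Int.floordiv (now_max - 100) 5
    let now_level := idx + 1
    let level_up := (fcmTable.lookup now_max).getD 0
    let next_coin_max := if idx + 1 < (fcmKeys.length : Int)
      then PySem.List.pyGet? fcmKeys (idx + 1) else none
    [("now_level", some now_level), ("max_level", some (fcmKeys.length : Int)),
     ("level_up", some level_up), ("next_coin_max", next_coin_max)]
  else
    [("now_level", some ((fcmKeys.length : Int) + 1)), ("max_level", some (fcmKeys.length : Int)),
     ("level_up", some 50), ("next_coin_max", none)]

-- ===== PRECONDITION & SPEC =====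
def Spec_find_coin_max (now_max : Int) (out : List (String × Option Int)) : Prop := out = find_coin_max_alt now_max
instance (now_max : Int) (out : List (String × Option Int)) : Decidable (Spec_find_coin_max now_max out) := by unfold Spec_find_coin_max; infer_instance

-- ===== CLAIM (what is proved, stated in full; the proofs are below) =====
def Claim_equal_find_coin_max : Prop := ∀ (now_max : Int), Dom_find_coin_max now_max → Spec_find_coin_max now_max (find_coin_max now_max)

-- ===== LEMMAS AND PROOFS =====

-- ===== VERDICT (by name: the statement is the Claim_ definition above) =====
theorem find_coin_max_spec : Claim_equal_find_coin_max := by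
  intro n _
  unfold Spec_find_coin_max
  by_cases h : n ∈ fcmKeys
  · simp only [fcmKeys, List.mem_cons, List.not_mem_nil, or_false] at h
    rcases h with rfl|rfl|rfl|rfl|rfl|rfl|rfl|rfl|rfl|rfl|rfl|rfl|rfl|rfl|rfl|rfl|rfl|rfl|rfl|rfl|rfl|rfl|rfl|rfl|rfl|rfl|rfl|rfl|rfl|rfl|rfl <;> decide
  · have h' := h
    simp only [fcmKeys, List.mem_cons, List.not_mem_nil, or_false, not_or] at h'
    obtain ⟨h1, h2, h3, h4, h5, h6, h7, h8, h9, h10, h11, h12, h13, h14, h15, h16, h17, h18, h19, h20, h21, h22, h23, h24, h25, h26, h27, h28, h29, h30, h31⟩ := h'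
    simp [find_coin_max, find_coin_max_alt, fcmLoop1, fcmLoop2, fcmTable, fcmKeys,
      h1, h2, h3, h4, h5, h6, h7, h8, h9, h10, h11, h12, h13, h14, h15, h16, h17, h18, h19, h20, h21, h22, h23, h24, h25, h26, h27, h28, h29, h30, h31]
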